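-- pv_equiv track=rewrite | github.com/Blimba/ProbeStation | imports/chip.py | _w2d
-- ===== SOURCE A (Python) =====
-- def _w2d(w):
--     '''
--     transforms column letter to column number
--     :param w:
--     :return column number (int):
--     '''
--     w = w.lower()
--     base = ord('z')-ord('a')+1
--     d = 0
--     for index, ch in enumerate(reversed(w)):
--         if index > 0:
--             d += base ** index * (ord(ch) - ord('a') + 1)
--         else:
--             d += base**index * (ord(ch)-ord('a'))
--     return d
-- ===== SOURCE B (Python) =====
-- def _w2d(w):
--     '''
--     transforms column letter to column number
--     :param w:
--     :return column number (int):
--     '''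
--     if not w:
--         return 0
--     d = 0
--     for ch in w.lower():
--         d = d * 26 + (ord(ch) - ord('a') + 1)
--     return d - 1
-- ===== Notes on version B (the rewrite author's own statement) =====
-- stated objective: faster
-- what changed: Replaces the reversed-enumerate loop computing a fresh power base**index for every position with a single forward Horner accumulation d = d*26 + digit followed by a final -1 (which accounts for A's 0-based least-significant digit).
import Mathlib
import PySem

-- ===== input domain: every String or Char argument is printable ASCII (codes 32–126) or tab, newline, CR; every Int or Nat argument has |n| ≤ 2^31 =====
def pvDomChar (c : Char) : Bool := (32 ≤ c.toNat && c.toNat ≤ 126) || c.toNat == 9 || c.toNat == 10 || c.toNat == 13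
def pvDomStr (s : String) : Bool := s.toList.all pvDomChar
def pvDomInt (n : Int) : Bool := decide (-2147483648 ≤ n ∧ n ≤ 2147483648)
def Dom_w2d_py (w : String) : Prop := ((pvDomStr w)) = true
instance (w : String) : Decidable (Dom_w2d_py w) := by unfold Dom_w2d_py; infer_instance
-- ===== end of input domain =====

-- B replaces A's reversed-enumerate loop with per-index powers by a forward Horner
-- accumulation (d = d*26 + digit, then -1); objective: simpler. Same return value.

-- ===== PORT A =====
-- literal port of A: lower the string, fold over enumerate(reversed(w)),
-- adding base**index * (ord-97+1) for index>0 and base**index * (ord-97) at index 0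
def w2d_py (w : String) : Int :=
  let wl := PySem.Str.lower w
  let base : Int := 122 - 97 + 1          -- ord('z') - ord('a') + 1
  (PySem.List.enumerate wl.toList.reverse).foldl
    (fun d p =>
      if p.1 > 0 then d + base ^ p.1.toNat * ((p.2.toNat : Int) - 97 + 1)
      else d + base ^ p.1.toNat * ((p.2.toNat : Int) - 97)) 0

-- ===== PORT B =====
-- literal port of B: empty-string guard, then Horner pass over w.lower(), minus 1
def w2d_py_alt (w : String) : Int :=
  if w.toList = [] then 0
  else
    ((PySem.Str.lower w).toList.foldl
      (fun d c => d * 26 + ((c.toNat : Int) - 97 + 1)) 0) - 1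

-- ===== PRECONDITION & SPEC =====
def Spec_w2d_py (w : String) (out : Int) : Prop := out = w2d_py_alt w
instance (w : String) (out : Int) : Decidable (Spec_w2d_py w out) := by unfold Spec_w2d_py; infer_instance

-- ===== CLAIM (what is proved, stated in full; the proofs are below) =====
def Claim_equal_w2d_py : Prop := ∀ (w : String), Dom_w2d_py w → Spec_w2d_py w (w2d_py w)

-- ===== LEMMAS AND PROOFS =====

-- A's fold over enumerate (l.reverse), as a function of the (already lowered) char list
def pvFoldA (l : List Char) : Int :=
  (PySem.List.enumerate l.reverse).foldl
    (fun d p =>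
      if p.1 > 0 then d + (26 : Int) ^ p.1.toNat * ((p.2.toNat : Int) - 97 + 1)
      else d + (26 : Int) ^ p.1.toNat * ((p.2.toNat : Int) - 97)) 0

-- B's Horner fold
def pvHorner (l : List Char) (d : Int) : Int :=
  l.foldl (fun d c => d * 26 + ((c.toNat : Int) - 97 + 1)) d

theorem pvHorner_shift (l : List Char) (d : Int) :
    pvHorner l d = d * 26 ^ l.length + pvHorner l 0 := by
  induction l generalizing d with
  | nil => simp [pvHorner]
  | cons c t ih =>
    show pvHorner t (d * 26 + _) = _ * _ + pvHorner t (0 * 26 + _)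
    rw [ih (d * 26 + _), ih (0 * 26 + _)]
    simp [List.length_cons]
    ring

theorem pvFoldA_eq (l : List Char) :
    pvFoldA l = pvHorner l 0 - (if l = [] then 0 else 1) := by
  induction l with
  | nil => simp [pvFoldA, pvHorner, PySem.List.enumerate_nil]
  | cons c t ih =>
    have hstep : pvFoldA (c :: t) =
        pvFoldA t + (if ((t.length : Int)) > 0
          then (26 : Int) ^ t.length * ((c.toNat : Int) - 97 + 1)
          else (26 : Int) ^ t.length * ((c.toNat : Int) - 97)) := by
      unfold pvFoldA
      rw [show (c :: t).reverse = t.reverse ++ [c] by simp,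
        PySem.List.enumerate_append, List.foldl_append]
      simp [PySem.List.enumerate_cons, PySem.List.enumerate_nil]
      split_ifs <;> ring
    have hH : pvHorner (c :: t) 0 =
        ((c.toNat : Int) - 97 + 1) * 26 ^ t.length + pvHorner t 0 := by
      show pvHorner t (0 * 26 + _) = _
      rw [pvHorner_shift t]
      ring
    rcases eq_or_ne t ([] : List Char) with h | h
    · subst h
      simp [pvHorner, pvFoldA, PySem.List.enumerate_nil]
    · have hlen : (0 : Int) < (t.length : Int) := by
        have : 0 < t.length := List.length_pos_iff.mpr h
        exact_mod_cast this
      have hl : 0 < t.length := List.length_pos_iff.mpr h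
      rw [hstep, ih, hH]
      simp [h, hl]
      ring

-- ===== VERDICT (by name: the statement is the Claim_ definition above) =====
theorem w2d_py_spec : Claim_equal_w2d_py := by
  intro w _
  show w2d_py w = w2d_py_alt w
  have hA : w2d_py w = pvFoldA (PySem.Str.lower w).toList := by
    simp [w2d_py, pvFoldA]
  have hlow : (PySem.Str.lower w).toList = PySem.Chars.lower w.toList := by
    simp [PySem.Str.toList_lower]
  rw [hA, pvFoldA_eq]
  rcases eq_or_ne w.toList ([] : List Char) with h | h
  · simp [w2d_py_alt, h, hlow, PySem.Chars.lower, pvHorner]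
  · have hne : ¬ PySem.Chars.lower w.toList = [] := by
      simpa [PySem.Chars.lower] using h
    simp [w2d_py_alt, h, hlow, hne, pvHorner]
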